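-- pv_equiv track=rewrite | github.com/Feyerabend/cc | ch03/sec3.5.2/testvm/testvm.py | _tokenize_line
-- ===== SOURCE A (Python) =====
-- from typing import Any, Dict, List, Optional, Union, Callable, Tuple
--
-- def _tokenize_line(line: str) -> List[str]:
--     tokens = []
--     current_token = ""
--     in_quotes = False
--     escape_next = False
--
--     for char in line:
--         if escape_next:
--             current_token += char
--             escape_next = False
--         elif char == '\\':
--             escape_next = True
--         elif char == '"':
--             if in_quotes:
--                 tokens.append('"' + current_token + '"')
--                 current_token = ""
--                 in_quotes = False
--             else:
--                 if current_token:
--                     tokens.append(current_token)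
--                     current_token = ""
--                 in_quotes = True
--         elif char == ' ' and not in_quotes:
--             if current_token:
--                 tokens.append(current_token)
--                 current_token = ""
--         else:
--             current_token += char
--
--     if current_token:
--         tokens.append(current_token)
--
--     return tokens
-- ===== SOURCE B (Python) =====
-- from typing import List
--
-- def _tokenize_line(line: str) -> List[str]:
--     tokens: List[str] = []
--     cur = ""
--     n = len(line)
--     i = 0
--     while i < n:
--         c = line[i]
--         if c == '\\':
--             if i + 1 < n:
--                 cur += line[i + 1]
--                 i += 2
--             else:
--                 i += 1
--         elif c == ' ':
--             if cur:
--                 tokens.append(cur)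
--                 cur = ""
--             i += 1
--         elif c == '"':
--             if cur:
--                 tokens.append(cur)
--                 cur = ""
--             i += 1
--             body = ""
--             closed = False
--             while i < n:
--                 ch = line[i]
--                 if ch == '\\':
--                     if i + 1 < n:
--                         body += line[i + 1]
--                         i += 2
--                     else:
--                         i += 1
--                 elif ch == '"':
--                     closed = True
--                     i += 1
--                     break
--                 else:
--                     body += ch
--                     i += 1
--             if closed:
--                 tokens.append('"' + body + '"')
--             elif body:
--                 tokens.append(body)
--         else:
--             cur += c
--             i += 1
--     if cur:
--         tokens.append(cur)
--     return tokens
-- ===== Notes on version B (the rewrite author's own statement) =====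
-- stated objective: alternative
-- what changed: Replaced A's single character loop driven by two boolean state flags (in_quotes, escape_next) with an index-based scan that handles each escape by consuming two characters at once and tokenizes a quoted body in a dedicated inner loop.
import Mathlib
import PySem

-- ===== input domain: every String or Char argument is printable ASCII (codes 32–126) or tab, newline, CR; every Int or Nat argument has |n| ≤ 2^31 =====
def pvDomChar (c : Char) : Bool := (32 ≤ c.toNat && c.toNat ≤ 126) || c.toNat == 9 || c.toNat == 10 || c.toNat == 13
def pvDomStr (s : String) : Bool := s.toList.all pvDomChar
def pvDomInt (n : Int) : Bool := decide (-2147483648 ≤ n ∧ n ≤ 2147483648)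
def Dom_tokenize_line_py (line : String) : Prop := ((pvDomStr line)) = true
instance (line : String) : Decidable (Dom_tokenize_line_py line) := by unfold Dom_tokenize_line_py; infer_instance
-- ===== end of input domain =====

-- B replaces A's single loop with two boolean state flags by a scan with a dedicated
-- inner loop for a quoted body; objective: alternative decomposition, same cost.

-- ===== PORT A =====
-- A's for-loop over the characters: state = (current_token, in_quotes, escape_next);
-- tokens.append becomes cons onto the recursive result; the final
-- 'if current_token: tokens.append(current_token)' is the [] case.
def aLoop : List Char → String → Bool → Bool → List String
  | [], cur, _, _ => if cur ≠ "" then [cur] else []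
  | c :: cs, cur, inq, esc =>
    if esc then aLoop cs (cur.push c) inq false
    else if c = '\\' then aLoop cs cur inq true
    else if c = '"' then
      if inq then ("\"" ++ cur ++ "\"") :: aLoop cs "" false false
      else if cur ≠ "" then cur :: aLoop cs "" true false
      else aLoop cs cur true false
    else if c = ' ' ∧ inq = false then
      if cur ≠ "" then cur :: aLoop cs "" inq false else aLoop cs "" inq false
    else aLoop cs (cur.push c) inq false

def tokenize_line_py (line : String) : List String :=
  aLoop line.toList "" false false

-- ===== PORT B =====
-- Inner while-loop of B: collects the quoted body (honouring backslash-escapes),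
-- returns (body, closed?, rest of the line after the closing quote).
def bQuoted : List Char → String → String × Bool × List Char
  | [], body => (body, false, [])
  | c :: cs, body =>
    if c = '\\' then
      match cs with
      | d :: ds => bQuoted ds (body.push d)
      | [] => bQuoted [] body
    else if c = '"' then (body, true, cs)
    else bQuoted cs (body.push c)

-- needed by bLoop's termination: the inner scan never lengthens the line
theorem bQuoted_rest_le : ∀ (cs : List Char) (body : String),
    (bQuoted cs body).2.2.length ≤ cs.length := by
  intro cs body
  induction cs, body using bQuoted.induct with
  | case1 => simp [bQuoted]
  | case2 body d ds ih => simp [bQuoted]; omega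
  | case3 body ih => simp [bQuoted]
  | case4 cs body h =>
    rw [bQuoted.eq_def]; simp only [if_neg h, if_pos rfl]; simp
  | case5 c cs body h1 h2 ih =>
    rw [bQuoted.eq_def]; simp only [if_neg h1, if_neg h2, List.length_cons]; omega

-- Outer while-loop of B.
def bLoop : List Char → String → List String
  | [], cur => if cur ≠ "" then [cur] else []
  | c :: cs, cur =>
    if c = '\\' then
      match cs with
      | d :: ds => bLoop ds (cur.push d)
      | [] => bLoop [] cur
    else if c = ' ' then
      if cur ≠ "" then cur :: bLoop cs "" else bLoop cs ""
    else if c = '"' then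
      (if cur ≠ "" then [cur] else []) ++
        (let q := bQuoted cs ""
         (if q.2.1 then ["\"" ++ q.1 ++ "\""] else if q.1 ≠ "" then [q.1] else []) ++
           bLoop q.2.2 "")
    else bLoop cs (cur.push c)
  termination_by cs _ => cs.length
  decreasing_by
    all_goals first
      | (simp; done)
      | (have := bQuoted_rest_le cs ""; simp; omega)
      | (simp; omega)

def tokenize_line_py_alt (line : String) : List String :=
  bLoop line.toList ""

-- ===== PRECONDITION & SPEC =====
def Spec_tokenize_line_py (line : String) (out : List String) : Prop := out = tokenize_line_py_alt line
instance (line : String) (out : List String) : Decidable (Spec_tokenize_line_py line out) := by unfold Spec_tokenize_line_py; infer_instance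

-- ===== CLAIM (what is proved, stated in full; the proofs are below) =====
def Claim_equal_tokenize_line_py : Prop := ∀ (line : String), Dom_tokenize_line_py line → Spec_tokenize_line_py line (tokenize_line_py line)

-- ===== LEMMAS AND PROOFS =====

-- one-step unfoldings of A's loop
theorem aLoop_esc (c : Char) (cs : List Char) (cur : String) (inq : Bool) :
    aLoop (c :: cs) cur inq true = aLoop cs (cur.push c) inq false := by
  rw [aLoop.eq_def]; simp

theorem aLoop_backslash (cs : List Char) (cur : String) (inq : Bool) :
    aLoop ('\\' :: cs) cur inq false = aLoop cs cur inq true := by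
  rw [aLoop.eq_def]; simp

theorem aLoop_quote_in (cs : List Char) (cur : String) :
    aLoop ('"' :: cs) cur true false =
      ("\"" ++ cur ++ "\"") :: aLoop cs "" false false := by
  rw [aLoop.eq_def]; simp

theorem aLoop_quote_out (cs : List Char) (cur : String) :
    aLoop ('"' :: cs) cur false false =
      (if cur ≠ "" then cur :: aLoop cs "" true false else aLoop cs cur true false) := by
  rw [aLoop.eq_def]; simp

theorem aLoop_space_out (cs : List Char) (cur : String) :
    aLoop (' ' :: cs) cur false false =
      (if cur ≠ "" then cur :: aLoop cs "" false false else aLoop cs "" false false) := by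
  rw [aLoop.eq_def]; simp

theorem aLoop_other (c : Char) (cs : List Char) (cur : String) (inq : Bool)
    (h1 : ¬c = '\\') (h2 : ¬c = '"') (h3 : ¬(c = ' ' ∧ inq = false)) :
    aLoop (c :: cs) cur inq false = aLoop cs (cur.push c) inq false := by
  rw [aLoop.eq_def]; simp [h1, h2, h3]

-- if the inner scan never finds a closing quote, it consumes the whole line
theorem bQuoted_not_closed : ∀ (cs : List Char) (body : String),
    (bQuoted cs body).2.1 = false → (bQuoted cs body).2.2 = [] := by
  intro cs body
  induction cs, body using bQuoted.induct with
  | case1 => simp [bQuoted]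
  | case2 body d ds ih => simpa [bQuoted] using ih
  | case3 body ih => simpa [bQuoted] using ih
  | case4 cs body h =>
    rw [bQuoted.eq_def]; simp only [if_neg h, if_pos rfl]; simp
  | case5 c cs body h1 h2 ih =>
    rw [bQuoted.eq_def]; simp only [if_neg h1, if_neg h2]; exact ih

-- A's loop in the quoted state is B's inner scan followed by the matching emission
theorem aLoop_quoted : ∀ (cs : List Char) (body : String),
    aLoop cs body true false =
      (let q := bQuoted cs body
       if q.2.1 then ("\"" ++ q.1 ++ "\"") :: aLoop q.2.2 "" false false
       else if q.1 ≠ "" then [q.1] else []) := by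
  intro cs body
  induction cs, body using bQuoted.induct with
  | case1 body => simp [aLoop, bQuoted]
  | case2 body d ds ih =>
    rw [aLoop_backslash, aLoop_esc]
    simpa [bQuoted] using ih
  | case3 body ih =>
    rw [aLoop_backslash]
    rw [aLoop.eq_def]
    simpa [bQuoted] using ih
  | case4 cs body h =>
    rw [aLoop_quote_in, bQuoted.eq_def]
    simp only [if_neg h, if_pos rfl]
    simp
  | case5 c cs body h1 h2 ih =>
    rw [aLoop_other c cs body true h1 h2 (by simp), bQuoted.eq_def]
    simp only [if_neg h1, if_neg h2]
    exact ih

-- A's loop in the unquoted state is B's outer loop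
theorem aLoop_eq_bLoop : ∀ (cs : List Char) (cur : String),
    aLoop cs cur false false = bLoop cs cur := by
  intro cs cur
  induction cs, cur using bLoop.induct with
  | case1 cur h => simp [aLoop, bLoop, h]
  | case2 cur h => simp [aLoop, bLoop, h]
  | case3 cur d ds ih =>
    rw [aLoop_backslash, aLoop_esc, bLoop.eq_def]
    simpa using ih
  | case4 cur ih =>
    rw [aLoop_backslash]
    rw [aLoop.eq_def, bLoop.eq_def]
    simpa [aLoop] using ih
  | case5 cs cur h _ ih =>
    rw [aLoop_space_out, bLoop.eq_def]
    simp [h, ih]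
  | case6 cs cur h _ ih =>
    rw [aLoop_space_out, bLoop.eq_def]
    simp [h, ih]
  | case7 cs cur h1 h2 ih =>
    rw [aLoop_quote_out, bLoop.eq_def]
    simp only [if_neg h1, if_neg h2, if_pos rfl]
    by_cases hcur : cur ≠ ""
    · simp only [if_pos hcur, aLoop_quoted cs ""]
      by_cases hc : (bQuoted cs "").2.1
      · simp [hc, ih]
      · have hrest := bQuoted_not_closed cs "" (by simp_all)
        simp [hc, hrest] at ih ⊢
        simp [ih, bLoop]
    · simp only [if_neg hcur]
      have hcur' : cur = "" := by simpa using hcur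
      subst hcur'
      rw [aLoop_quoted cs ""]
      by_cases hc : (bQuoted cs "").2.1
      · simp [hc, ih]
      · have hrest := bQuoted_not_closed cs "" (by simp_all)
        simp [hc, hrest] at ih ⊢
        simp [ih, bLoop]
  | case8 c cs cur h1 h2 h3 ih =>
    rw [aLoop_other c cs cur false h1 h3 (by simp [h2]), bLoop.eq_def]
    simp [h1, h2, h3, ih]

-- ===== VERDICT (by name: the statement is the Claim_ definition above) =====
theorem tokenize_line_py_spec : Claim_equal_tokenize_line_py := by
  intro line _
  unfold Spec_tokenize_line_py tokenize_line_py tokenize_line_py_alt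
  exact aLoop_eq_bLoop _ _
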